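-- pv_equiv track=rewrite | github.com/Oeyvind/rhythm_ratio_analyzer | ratio_analyzer.py | make_box_notation
-- ===== SOURCE A (Python) =====
-- def make_box_notation(dur_pattern):
--     # 1=transient, 0 = space
--     # e.g. for rhythm 6/6, 3/6, 3/6, 2/6, 2/6, 2/6, the sequence will be
--     # [1, 0, 0, 0, 0, 0, 1, 0, 0, 1, 0, 0, 1, 0, 1, 0, 1, 0]
--     box_notation = []
--     for num in dur_pattern:
--         box_notation.append(1)
--         for i in range(num-1):
--             box_notation.append(0)
--     box_notation.append(1) # add a last 1 as terminator after last duration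
--     return box_notation
-- ===== SOURCE B (Python) =====
-- def make_box_notation(dur_pattern):
--     # Preallocate the whole box and mark transients at prefix-sum indices.
--     clamped = [max(d, 1) for d in dur_pattern]
--     total = sum(clamped) + 1
--     box = [0] * total
--     i = 0
--     for d in clamped:
--         box[i] = 1
--         i += d
--     box[i] = 1
--     return box
-- ===== Notes on version B (the rewrite author's own statement) =====
-- stated objective: alternative
-- what changed: B preallocates a zero-filled list of length sum(clamped durations)+1 and writes 1s at the running prefix-sum indices, instead of A's nested append loop emitting a 1 followed by num-1 zeros per duration.
import Mathlib
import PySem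

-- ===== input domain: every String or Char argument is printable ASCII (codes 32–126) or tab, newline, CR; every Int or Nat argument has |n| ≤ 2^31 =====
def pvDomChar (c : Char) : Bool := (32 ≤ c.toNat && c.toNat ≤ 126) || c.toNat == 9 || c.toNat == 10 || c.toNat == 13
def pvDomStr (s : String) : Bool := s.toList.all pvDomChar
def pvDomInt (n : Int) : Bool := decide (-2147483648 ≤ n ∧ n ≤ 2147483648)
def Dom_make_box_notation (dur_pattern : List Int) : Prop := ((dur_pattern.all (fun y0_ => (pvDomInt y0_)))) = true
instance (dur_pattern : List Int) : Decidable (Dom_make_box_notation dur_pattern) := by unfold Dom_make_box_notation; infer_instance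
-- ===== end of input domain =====

-- B preallocates the whole box and writes 1s at prefix-sum indices instead of A's
-- nested append loops; same cost, different decomposition (objective: alternative).

-- ===== PORT A =====
def make_box_notation (dur_pattern : List Int) : List Int :=
  (dur_pattern.foldl
    (fun box num =>
      let box := box ++ [1]
      (PySem.List.pyRange 0 (num - 1) 1).foldl (fun b _ => b ++ [0]) box)
    []) ++ [1]

-- ===== PORT B =====
-- B: preallocate [0]*total and write 1s at the running prefix-sum indices
-- (the index stays ≥ 0 throughout, so `.toNat` is exact for Python's box[i] = 1)
def make_box_notation_alt (dur_pattern : List Int) : List Int :=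
  let clamped := dur_pattern.map (fun d => max d 1)
  let total := clamped.foldl (· + ·) 0 + 1
  let box := List.replicate total.toNat 0
  let s := clamped.foldl
    (fun (s : List Int × Int) d => (s.1.set s.2.toNat 1, s.2 + d)) (box, (0 : Int))
  s.1.set s.2.toNat 1

-- ===== PRECONDITION & SPEC =====
def Spec_make_box_notation (dur_pattern : List Int) (out : List Int) : Prop := out = make_box_notation_alt dur_pattern
instance (dur_pattern : List Int) (out : List Int) : Decidable (Spec_make_box_notation dur_pattern out) := by unfold Spec_make_box_notation; infer_instance

-- ===== CLAIM (what is proved, stated in full; the proofs are below) =====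
def Claim_equal_make_box_notation : Prop := ∀ (dur_pattern : List Int), Dom_make_box_notation dur_pattern → Spec_make_box_notation dur_pattern (make_box_notation dur_pattern)

-- ===== LEMMAS AND PROOFS =====

theorem pv_foldl_add (l : List Int) (a : Int) : l.foldl (· + ·) a = a + l.foldl (· + ·) 0 := by
  induction l generalizing a with
  | nil => simp
  | cons d t ih => simp only [List.foldl_cons]; rw [ih (a + d), ih (0 + d)]; ring

theorem pv_sum_nonneg (l : List Int) (h : ∀ d ∈ l, 1 ≤ d) : 0 ≤ l.foldl (· + ·) 0 := by
  induction l with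
  | nil => simp
  | cons d t ih =>
    have hd := h d (by simp)
    have ht := ih (fun x hx => h x (by simp [hx]))
    rw [List.foldl_cons, pv_foldl_add]
    omega

-- A's inner loop appends (num-1).toNat zeros
theorem pv_inner (l : List Int) (b : List Int) :
    l.foldl (fun b _ => b ++ [(0 : Int)]) b = b ++ List.replicate l.length 0 := by
  induction l generalizing b with
  | nil => simp
  | cons x t ih => simp [ih, List.replicate_succ]

theorem pv_A_flatMap (p : List Int) :
    make_box_notation p
      = p.flatMap (fun num => 1 :: List.replicate (num - 1).toNat 0) ++ [1] := by
  unfold make_box_notation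
  have hstep : (fun (box : List Int) (num : Int) =>
      (PySem.List.pyRange 0 (num - 1) 1).foldl (fun b _ => b ++ [0]) (box ++ [1]))
      = fun box num => box ++ (1 :: List.replicate (num - 1).toNat 0) := by
    funext box num
    rw [pv_inner, PySem.List.length_pyRange_one]
    simp
  simp only [hstep]
  rw [PySem.List.foldl_append_eq_flatMap]
  simp

-- writing a 1 at the head of the zero region
theorem pv_set_head (done : List Int) (a b : Nat) :
    (done ++ List.replicate (1 + a + b) (0 : Int)).set done.length 1
      = (done ++ 1 :: List.replicate a 0) ++ List.replicate b 0 := by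
  have h1 : (1 + a + b) = (a + b) + 1 := by omega
  have h2 : List.replicate (1 + a + b) (0 : Int)
      = 0 :: (List.replicate a 0 ++ List.replicate b 0) := by
    rw [h1, List.replicate_succ, List.replicate_add]
  rw [h2, List.set_append_right _ _ (le_refl _)]
  simp

-- B's filling loop invariant
theorem pv_fill (l : List Int) (h : ∀ d ∈ l, 1 ≤ d) (done : List Int) :
    (l.foldl (fun (s : List Int × Int) d => (s.1.set s.2.toNat 1, s.2 + d))
        (done ++ List.replicate (l.foldl (· + ·) 0 + 1).toNat 0, (done.length : Int))).1.set
      ((l.foldl (fun (s : List Int × Int) d => (s.1.set s.2.toNat 1, s.2 + d))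
        (done ++ List.replicate (l.foldl (· + ·) 0 + 1).toNat 0, (done.length : Int))).2).toNat 1
      = done ++ l.flatMap (fun d => 1 :: List.replicate (d - 1).toNat 0) ++ [1] := by
  induction l generalizing done with
  | nil =>
      simp only [List.foldl_nil, List.flatMap_nil, List.append_nil]
      rw [Int.toNat_natCast]
      have := pv_set_head done 0 0
      simpa using this
  | cons d t ih =>
      have hd : 1 ≤ d := h d (by simp)
      have hs : 0 ≤ t.foldl (· + ·) 0 := pv_sum_nonneg t (fun x hx => h x (by simp [hx]))
      have htot : ((d :: t).foldl (· + ·) 0 + 1).toNat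
          = 1 + (d - 1).toNat + (t.foldl (· + ·) 0 + 1).toNat := by
        rw [List.foldl_cons, pv_foldl_add]
        omega
      rw [htot, List.foldl_cons]
      simp only [Int.toNat_natCast]
      have hset := pv_set_head done ((d - 1).toNat) ((t.foldl (· + ·) 0 + 1).toNat)
      rw [hset]
      have hidx : (done.length : Int) + d
          = (((done ++ 1 :: List.replicate (d - 1).toNat 0).length : Nat) : Int) := by
        simp only [List.length_append, List.length_cons, List.length_replicate]
        push_cast
        omega
      rw [hidx, ih (fun x hx => h x (by simp [hx]))]
      simp [List.append_assoc]

theorem pv_B_flatMap (p : List Int) :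
    make_box_notation_alt p
      = (p.map (fun d => max d 1)).flatMap (fun d => 1 :: List.replicate (d - 1).toNat 0) ++ [1] := by
  unfold make_box_notation_alt
  have h : ∀ d ∈ p.map (fun d => max d 1), (1 : Int) ≤ d := by
    intro d hd
    simp only [List.mem_map] at hd
    obtain ⟨x, _, rfl⟩ := hd
    exact le_max_right x 1
  have := pv_fill (p.map (fun d => max d 1)) h []
  simpa using this

-- ===== VERDICT (by name: the statement is the Claim_ definition above) =====
theorem make_box_notation_spec : Claim_equal_make_box_notation := by
  intro p hdom
  clear hdom
  unfold Spec_make_box_notation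
  rw [pv_A_flatMap, pv_B_flatMap]
  congr 1
  induction p with
  | nil => rfl
  | cons d t ih =>
      simp only [List.map_cons, List.flatMap_cons]
      rw [ih]
      have h1 : (d - 1).toNat = (max d 1 - 1).toNat := by omega
      rw [h1]
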